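/- GENERATED by tools/from_farm_form.py from prooffarm-gif/accepted/DGifGetImageDesc.6/Proof.lean (a worked proof of the farm's unit `DGifGetImageDesc.6`,
   accepted by the verdict) — do not edit. -/
import Gif.Spec.Units.DGifGetImageDesc_6
import Gif.Spec.AllSegs
import Gif.Spec.Proved.DGifGetImageDesc_6_Lemmas

open X86 X86.User Asan ProgX.Base ProgX.Base.Spec Gif.Spec

set_option maxRecDepth 4000
set_option maxHeartbeats 4000000

/-- Segment 6 of `DGifGetImageDesc` (109583H … 1095D1H; dgif_lib.c:472-478): from `Slot` (the uncounted slot's colour map is set,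
`rbp = sp`) through the three checked NULL stores `sp->RasterBits`, `sp->ExtensionBlockCount`, `sp->ExtensionBlocks` (l.472-474) and
the checked `GifFile->ImageCount++` (l.476) to the shared exit 10949AH with `ebp = GIF_OK`: `Done` for the forest whose array
counts one more image `⟨cm, none, none⟩` (EX3: no extension list; SV2 SV3: `SavedAt.snoc`; FO1: `seg6_owns`). -/
theorem Gif.Spec.Proved.DGifGetImageDesc_6_ok : Gif.Spec.DGifGetImageDesc_6.Statement := by
  intro Lay hLay μ hμ u₀ hcode h_store8 h_store4 h_load4 H rest frames F R e ret Hc Fc v hat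
  -- 1. THE ENTRY ASSERTION `Slot` (at 109583H `lea rdi, [rbp+0x20]`, l.472), field by field
  obtain ⟨hmid, s, cm, hsaved, hroom, h_rbp, hmap, hown⟩ := hat
  obtain ⟨hA, himgs, hlz⟩ := hmid
  -- the entry state's facts: `he_room`, `he_top`, …
  have he := hA.entry
  v_entry he
  obtain ⟨henv, hrdi⟩ := hA.pre
  have hp := henv.heap
  have hbase := hp.base
  have hinv := hA.inv
  have hok := hA.ok
  have hcbase : Hc.base = 0x800000 := hA.region.1.trans hbase
  have hgifeq : Fc.gif = F.gif := hA.forest.1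
  have hpveq : Fc.pv = F.pv := hA.forest.2.1
  have hcur := henv.ctx.cursor_range hp.inv.shadow
  -- where gif and the array are
  have hgin := hok.owns.inside hinv.heap (o := (Fc.gif, 120)) List.mem_cons_self
  have harrIn : (s.arr, 56 * s.cap) ∈ Fc.owned := Gif.Spec.DGifGetImageDesc_6.seg6_arr_owned hsaved
  have hain := hok.owns.inside hinv.heap (o := (s.arr, 56 * s.cap)) harrIn
  simp only at hgin hain
  rw [hcbase] at hgin hain
  rw [hgifeq] at hgin
  have hg1 := hgin.1
  have hg2 := hgin.2.2.2.2
  have ha1 := hain.1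
  have ha2 := hain.2.2.2.2
  clear hgin hain
  -- 2. THE PRESENT STATE, in the walker's names
  have w_rip := hA.rip
  have c_rsp : v.reg .rsp = e.reg .rsp - 40 := hA.rsp
  have c_rbx : v.reg .rbx = e.reg .rdi := hA.rbx
  have w_eq : Mem.EqOn ProgX.Base.L.textLo ProgX.Base.L.textHi u₀.mem v.mem := ProgX.Base.conv_code_eqOn hA.code
  have hdf : v.flags .df = false := (show abiInv _ from hA.abi).1
  have hmx : v.mxcsr &&& 0x1F80 = 0x1F80 := (show abiInv _ from hA.abi).2
  have hsse := ProgX.Base.sseOK_of_abiInv hA.abi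
  have w_kept : RegsKept [.rsp] v v := RegsKept.refl _ _
  -- 3. THE WALK: 109583H … 1095CCH `jmp 10949a`, four check calls
  u_walk hcode [hμ.vendor]
    until [Gif.L.DGifGetImageDesc.at_10949a]
    span [ProgX.Base.L.textLo, ProgX.Base.L.textHi] side (v_side)
  -- 4. THE CHECK GOALS: the object is live, the access lies inside it
  case check_109587 =>
    -- l.472 `sp->RasterBits = NULL`: inside the array's object
    have hun : ShadowUntouched v.mem s_109587.mem := by v_untouched
    have hl : LiveIn (Hc.liveObjs ++ rest) frames s.arr (56 * s.cap) :=
      (hok.owns.live _ harrIn).liveIn rest frames (Nat.le_refl _) (Nat.le_refl _)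
    exact hl.accSmall hinv.shadow hun _ 8 (by decide) (by u_omega) (by u_omega)
  case check_109598 =>
    -- l.473 `sp->ExtensionBlockCount = 0`
    have hun : ShadowUntouched v.mem s_109598.mem := by v_untouched
    have hl : LiveIn (Hc.liveObjs ++ rest) frames s.arr (56 * s.cap) :=
      (hok.owns.live _ harrIn).liveIn rest frames (Nat.le_refl _) (Nat.le_refl _)
    exact hl.accSmall hinv.shadow hun _ 4 (by decide) (by u_omega) (by u_omega)
  case check_1095a8 =>
    -- l.474 `sp->ExtensionBlocks = NULL`
    have hun : ShadowUntouched v.mem s_1095a8.mem := by v_untouched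
    have hl : LiveIn (Hc.liveObjs ++ rest) frames s.arr (56 * s.cap) :=
      (hok.owns.live _ harrIn).liveIn rest frames (Nat.le_refl _) (Nat.le_refl _)
    exact hl.accSmall hinv.shadow hun _ 8 (by decide) (by u_omega) (by u_omega)
  case check_1095b9 =>
    -- l.476 `GifFile->ImageCount`: inside gif
    have hun : ShadowUntouched v.mem s_1095b9.mem := by v_untouched
    have hl : LiveIn (Hc.liveObjs ++ rest) frames Fc.gif 120 :=
      hok.gif_live.liveIn rest frames (Nat.le_refl _) (Nat.le_refl _)
    rw [hgifeq] at hl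
    exact hl.accSmall hinv.shadow hun _ 4 (by decide) (by u_omega) (by u_omega)
  -- 5. THE EXIT 0x10949a (l.478 `return GIF_OK`): the shared exit, `Done` with the slot counted
  -- gif and the array are two objects: 64 bytes apart
  have hfar := Gif.Spec.DGifGetImageDesc_6.seg6_far_gif hok hinv.heap hsaved
  rw [hgifeq] at hfar
  -- the count loaded at 1095BEH is the number of counted images
  have hcnt0 : v.mem.readLE (e.reg .rdi + 32) 4 = s.imgs.length := by
    have h0 := hok.shape.saved
    rw [hsaved] at h0
    have h1 := h0.2.1
    simp only [gfield] at h1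
    rw [rd_eq_readLE v.mem (e.reg .rdi + 32) (Fc.gif + 32) 4 (by u_omega)]
    exact h1
  generalize hn0 : Mem.readLE _ (e.reg .rdi + 32) 4 = n0 at w_mem w_rax w_flags
  have hn : n0 = s.imgs.length := by
    rw [← hn0]
    u_frame hcnt0
  subst hn
  clear hn0
  -- `add eax, 1` does not wrap: the array has room for one more slot inside the data space
  have hlen : s.imgs.length + 1 < 2 ^ 31 := by omega
  rw [Gif.Spec.DGifGetImageDesc_6.seg6_inc _ hlen] at w_mem
  -- the carried footprint of the function, as a literal list
  have hsame0 := hA.same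
  have hsame : Mem.SameExcept [⟨(e.reg .rsp).toNat - 496, (e.reg .rsp).toNat⟩, ⟨0x800000, 0x1000020⟩, ⟨R.cur, R.cur + 8⟩]
      e.mem s_1095cc.mem := by
    rw [w_mem]
    u_same
  have habi : (conv u₀).inv s_1095cc := by v_inv
  -- what was stored: the return addresses of the four checks, the slot's last three fields, the count
  have hun : ShadowUntouched v.mem s_1095cc.mem := by v_untouched
  have hs : Mem.SameExcept [⟨(e.reg .rsp).toNat - 48, (e.reg .rsp).toNat - 40⟩,
      ⟨s.arr + 56 * s.imgs.length + 32, s.arr + 56 * s.imgs.length + 56⟩, ⟨Fc.gif + 32, Fc.gif + 36⟩]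
      v.mem s_1095cc.mem := by
    rw [w_mem]
    u_same
  -- the values the four stores left
  have hr : SavedImage.RasterBits s_1095cc.mem (s.arr + 56 * s.imgs.length) = 0 := by
    simp only [gfield]
    rw [← rd_eq_readLE s_1095cc.mem (v.reg .rbp + 32) (s.arr + 56 * s.imgs.length + 32) 8 (by u_omega), w_mem]
    u_read
  have hc : SavedImage.ExtensionBlockCount s_1095cc.mem (s.arr + 56 * s.imgs.length) = 0 := by
    simp only [gfield]
    rw [← rd_eq_readLE s_1095cc.mem (v.reg .rbp + 40) (s.arr + 56 * s.imgs.length + 40) 4 (by u_omega), w_mem]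
    u_read
  have hb : SavedImage.ExtensionBlocks s_1095cc.mem (s.arr + 56 * s.imgs.length) = 0 := by
    simp only [gfield]
    rw [← rd_eq_readLE s_1095cc.mem (v.reg .rbp + 48) (s.arr + 56 * s.imgs.length + 48) 8 (by u_omega), w_mem]
    u_read
  have hcnt : GifFileType.ImageCount s_1095cc.mem Fc.gif = GifFileType.ImageCount v.mem Fc.gif + 1 := by
    have h0 := hok.shape.saved
    rw [hsaved] at h0
    rw [h0.2.1]
    simp only [gfield]
    rw [← rd_eq_readLE s_1095cc.mem (e.reg .rdi + 32) (Fc.gif + 32) 4 (by u_omega), w_mem]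
    u_read
  clear w_mem
  -- the state invariant with the slot counted; the heap's invariant; `LZOK`; the reader's measure
  have hok' := Gif.Spec.DGifGetImageDesc_6.seg6_gifok hok hinv.heap hcbase ⟨hcur.1, hcur.2.1⟩ hsaved hroom hmap hown
    (by omega) (by omega) hs hr hc hb hcnt
  have hinv' := Gif.Spec.DGifGetImageDesc_6.seg6_heapinv hinv hok hcbase hsaved hroom hun (by omega) hs
  have hlz' : LZOK s_1095cc.mem F.pv := by
    rw [← hpveq] at hlz ⊢
    exact Gif.Spec.DGifGetImageDesc_6.seg6_lzok hlz hok hinv.heap hcbase hsaved hroom (by omega) hs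
  have hrem' : rem R s_1095cc.mem = rem R v.mem :=
    Gif.Spec.DGifGetImageDesc_6.seg6_rem hok hinv.heap hcbase ⟨hcur.1, hcur.2.1⟩ hsaved (by omega) hs
  -- `Done`, with the forest whose array counts one more image
  refine ReachVia.done ⟨{ Fc with saved := some { s with imgs := s.imgs ++ [⟨cm, none, none⟩] } }, ?_⟩
  refine ⟨⟨hA.entry, hA.pre, w_rip, w_rsp, ?_, ?_, ?_, ?_, ?_, ?_, ?_, ?_, hinv', hA.region, hA.forest, hok', ?_, hsame,
    ProgX.Base.conv_code_in w_eq, habi⟩, ?_, ?_, ?_⟩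
  · -- rbx = gif
    rw [w_kept .rbx rfl]
    exact hA.rbx
  · -- r14
    rw [w_kept .r14 rfl]
    exact hA.r14
  · -- r15
    rw [w_kept .r15 rfl]
    exact hA.r15
  · -- the saved r13
    u_frame hA.slot_r13
  · -- the saved r12
    u_frame hA.slot_r12
  · -- the saved rbp
    u_frame hA.slot_rbp
  · -- the saved rbx
    u_frame hA.slot_rbx
  · -- the return address
    u_frame hA.slot_ra
  · -- the reader did not go back
    rw [hrem']
    exact hA.rem
  · -- GIF_OK
    left
    rw [w_rbp]
    decide
  · -- one more counted image, without raster and without extension list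
    intro _
    refine ⟨hlz', ⟨cm, none, none⟩, ?_, rfl, rfl⟩
    rw [← himgs, Forest.imgs_some hsaved]
    rfl
  · -- not GIF_ERROR
    intro h0
    rw [w_rbp] at h0
    exact absurd h0 (by decide)
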